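-- pv_equiv track=rewrite | github.com/Gukson/zadania_maturalne | zadanie63/main.py | Czy_dwie_obok
-- ===== SOURCE A (Python) =====
-- def Czy_dwie_obok(ciag):
--     test = 1
--     for x in range(1,len(ciag)):
--         if ciag[x] == "1" and ciag[x-1] == "1":
--             test*=0
--     if test == 1:
--         return False
--     elif test == 0:
--         return True
-- ===== SOURCE B (Python) =====
-- def Czy_dwie_obok(ciag):
--     # Two staged passes: first compute the lengths of all maximal runs of
--     # consecutive '1' characters, then test whether the longest run is >= 2.
--     runs = []
--     cur = 0
--     for c in ciag:
--         if c == "1":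
--             cur += 1
--         else:
--             runs.append(cur)
--             cur = 0
--     runs.append(cur)
--     return max(runs) >= 2
-- ===== Notes on version B (the rewrite author's own statement) =====
-- stated objective: alternative
-- what changed: Instead of scanning index pairs with a zero-multiplied flag, B computes the lengths of all maximal runs of consecutive '1's in one pass and then answers by testing whether the maximum run length is at least 2.
import Mathlib
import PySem

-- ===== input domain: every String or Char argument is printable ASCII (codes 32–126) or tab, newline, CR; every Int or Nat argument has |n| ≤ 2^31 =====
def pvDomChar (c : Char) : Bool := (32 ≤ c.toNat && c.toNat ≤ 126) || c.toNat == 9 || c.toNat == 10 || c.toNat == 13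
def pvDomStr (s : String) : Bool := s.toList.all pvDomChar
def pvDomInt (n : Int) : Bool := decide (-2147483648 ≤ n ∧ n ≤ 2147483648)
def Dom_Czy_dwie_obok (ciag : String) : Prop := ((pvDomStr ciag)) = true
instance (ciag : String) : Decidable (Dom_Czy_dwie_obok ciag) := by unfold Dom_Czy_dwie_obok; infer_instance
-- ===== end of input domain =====

-- B replaces A's index-pair scan with a zero-multiplied flag by two staged passes:
-- collect the lengths of all maximal runs of consecutive '1's, then test max(runs) >= 2.

-- ===== PORT A =====
def Czy_dwie_obok (ciag : String) : Bool :=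
  let test : Int := (PySem.List.pyRange 1 (PySem.Str.len ciag) 1).foldl
    (fun test x =>
      if PySem.Str.pyGet? ciag x == some '1' && PySem.Str.pyGet? ciag (x - 1) == some '1'
      then test * 0 else test) 1
  if test == 1 then false
  else if test == 0 then true
  else false  -- unreachable (test is always 0 or 1; Python's implicit None never happens)

-- ===== PORT B =====
def Czy_dwie_obok_alt (ciag : String) : Bool :=
  let st := ciag.toList.foldl
    (fun (st : List Int × Int) c =>
      if c == '1' then (st.1, st.2 + 1) else (st.1 ++ [st.2], 0)) ([], 0)
  let runs := st.1 ++ [st.2]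
  match PySem.List.max? runs (fun x => x) with
  | some m => decide (2 ≤ m)
  | none => false  -- unreachable: runs is nonempty

-- ===== PRECONDITION & SPEC =====
def Spec_Czy_dwie_obok (ciag : String) (out : Bool) : Prop := out = Czy_dwie_obok_alt ciag
instance (ciag : String) (out : Bool) : Decidable (Spec_Czy_dwie_obok ciag out) := by unfold Spec_Czy_dwie_obok; infer_instance

-- ===== CLAIM =====
def Claim_equal_Czy_dwie_obok : Prop := ∀ (ciag : String), Dom_Czy_dwie_obok ciag → Spec_Czy_dwie_obok ciag (Czy_dwie_obok ciag)

-- ===== LEMMAS AND PROOFS =====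

-- "the string has two adjacent '1's", as a structural recursion
def adjOnes : List Char → Bool
  | a :: b :: r => (a == '1' && b == '1') || adjOnes (b :: r)
  | _ => false

theorem adjOnes_one_cons (t : List Char) :
    adjOnes ('1' :: t) = ((t.head? == some '1') || adjOnes t) := by
  cases t <;> simp [adjOnes]

theorem adjOnes_cons_ne (c : Char) (t : List Char) (h : (c == '1') = false) :
    adjOnes (c :: t) = adjOnes t := by
  cases t <;> simp [adjOnes, h]

theorem adjOnes_iff (l : List Char) :
    adjOnes l = true ↔ ∃ j : Nat, l[j]? = some '1' ∧ l[j+1]? = some '1' := by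
  induction l with
  | nil => simp [adjOnes]
  | cons a t ih =>
    cases t with
    | nil =>
      simp only [adjOnes]
      constructor
      · intro h; simp at h
      · rintro ⟨j, h0, h1⟩
        cases j with
        | zero => simp at h1
        | succ k => simp at h0
    | cons b r =>
      simp only [adjOnes, Bool.or_eq_true, Bool.and_eq_true, beq_iff_eq]
      rw [ih]
      constructor
      · rintro (⟨ha, hb⟩ | ⟨j, h0, h1⟩)
        · exact ⟨0, by simp [ha, hb]⟩
        · exact ⟨j + 1, by simpa using h0, by simpa using h1⟩
      · rintro ⟨j, h0, h1⟩
        cases j with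
        | zero => left; constructor <;> simp_all
        | succ k => right; exact ⟨k, by simpa using h0, by simpa using h1⟩

-- the tail part of B's run scan: does the suffix (with a current run of length cur) contain a run ≥ 2?
def gRun : Int → List Char → Bool
  | cur, [] => decide (2 ≤ cur)
  | cur, c :: t => if c == '1' then gRun (cur + 1) t else (decide (2 ≤ cur) || gRun 0 t)

theorem gRun_eq (l : List Char) : ∀ cur : Int, 0 ≤ cur →
    gRun cur l = ((decide (1 ≤ cur) && (l.head? == some '1')) || decide (2 ≤ cur) || adjOnes l) := by
  induction l with
  | nil => intro cur _; simp [gRun, adjOnes]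
  | cons c t ih =>
    intro cur hc
    rw [gRun]
    by_cases h : (c == '1') = true
    · have hc1 : c = '1' := by simpa using h
      subst hc1
      rw [if_pos h, ih (cur + 1) (by omega), adjOnes_one_cons]
      have h1 : decide (1 ≤ cur + 1) = true := by simp; omega
      have h2 : decide (2 ≤ cur + 1) = decide (1 ≤ cur) := decide_eq_decide.mpr (by omega)
      simp only [h1, h2, Bool.true_and, List.head?_cons]
      by_cases hx : 1 ≤ cur
      · simp [hx]
      · have hx2 : ¬ (2 ≤ cur) := by omega
        simp [hx, hx2]
    · have h' : (c == '1') = false := by simpa using h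
      rw [if_neg h, ih 0 le_rfl, adjOnes_cons_ne c t h']
      simp [h']

-- B's first pass, related to gRun
theorem fold_any (l : List Char) : ∀ (runs : List Int) (cur : Int),
    (((l.foldl (fun (st : List Int × Int) c =>
        if c == '1' then (st.1, st.2 + 1) else (st.1 ++ [st.2], 0)) (runs, cur)).1
      ++ [(l.foldl (fun (st : List Int × Int) c =>
        if c == '1' then (st.1, st.2 + 1) else (st.1 ++ [st.2], 0)) (runs, cur)).2]).any
        (fun r => decide (2 ≤ r)))
    = (runs.any (fun r => decide (2 ≤ r)) || gRun cur l) := by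
  induction l with
  | nil => intro runs cur; simp [gRun, List.any_append]
  | cons c t ih =>
    intro runs cur
    rw [List.foldl_cons, gRun]
    by_cases h : (c == '1') = true
    · rw [if_pos h, if_pos h, ih runs (cur + 1)]
    · rw [if_neg h, if_neg h, ih (runs ++ [cur]) 0]
      simp [List.any_append, Bool.or_assoc]

-- max(runs) >= 2 tested via any, for nonempty runs
theorem max_ge_two_iff_any (l : List Int) (h : l ≠ []) :
    (match PySem.List.max? l (fun x => x) with
     | some m => decide (2 ≤ m)
     | none => false) = l.any (fun r => decide (2 ≤ r)) := by
  cases hm : PySem.List.max? l (fun x => x) with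
  | none => exact absurd ((PySem.List.max?_eq_none_iff _ _).mp hm) h
  | some m =>
    simp only
    apply Bool.eq_iff_iff.mpr
    simp only [decide_eq_true_eq, List.any_eq_true]
    constructor
    · intro h2; exact ⟨m, PySem.List.max?_mem hm, by simpa using h2⟩
    · rintro ⟨r, hr, h2⟩
      have := PySem.List.max?_isMax hm r hr
      simp at h2 ⊢; omega

-- B computes adjOnes
theorem alt_eq_adjOnes (ciag : String) : Czy_dwie_obok_alt ciag = adjOnes ciag.toList := by
  unfold Czy_dwie_obok_alt
  rw [max_ge_two_iff_any _ (by simp), fold_any, gRun_eq _ 0 le_rfl]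
  simp

-- A's accumulator, once 'test * 0' is recognised as 0: a fold that latches to 0
theorem foldl_if_zero (P : Int → Bool) :
    ∀ (l : List Int) (t : Int),
      l.foldl (fun t x => if P x then 0 else t) t = if l.any P then 0 else t := by
  intro l
  induction l with
  | nil => intro t; simp
  | cons a l ih =>
    intro t
    by_cases h : P a = true <;> simp [List.foldl_cons, h, ih]

-- A computes the "∃ adjacent index" condition, hence adjOnes
theorem a_eq_adjOnes (ciag : String) : Czy_dwie_obok ciag = adjOnes ciag.toList := by
  unfold Czy_dwie_obok
  have hfun : (fun (t x : Int) =>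
      if PySem.Str.pyGet? ciag x == some '1' && PySem.Str.pyGet? ciag (x - 1) == some '1'
      then t * 0 else t)
      = (fun t x => if (PySem.Str.pyGet? ciag x == some '1' && PySem.Str.pyGet? ciag (x - 1) == some '1') then 0 else t) := by
    funext t x
    split
    · exact mul_zero t
    · rfl
  rw [hfun, foldl_if_zero]
  have key : ((PySem.List.pyRange 1 (PySem.Str.len ciag) 1).any
      (fun x => PySem.Str.pyGet? ciag x == some '1' && PySem.Str.pyGet? ciag (x - 1) == some '1'))
      = adjOnes ciag.toList := by
    apply Bool.eq_iff_iff.mpr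
    rw [List.any_eq_true, adjOnes_iff]
    constructor
    · rintro ⟨x, hx, hP⟩
      rw [PySem.List.mem_pyRange_one] at hx
      have hlen : PySem.Str.len ciag = ciag.toList.length := by simp
      rw [hlen] at hx
      simp only [Bool.and_eq_true, beq_iff_eq, PySem.Str.pyGet?_eq,
        PySem.Chars.pyGet?_eq_listPyGet?] at hP
      obtain ⟨hP1, hP0⟩ := hP
      have e1 : x = ((x.toNat - 1 + 1 : Nat) : Int) := by omega
      have e0 : x - 1 = ((x.toNat - 1 : Nat) : Int) := by omega
      rw [e0, PySem.List.pyGet?_natCast] at hP0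
      rw [e1, PySem.List.pyGet?_natCast] at hP1
      exact ⟨x.toNat - 1, hP0, hP1⟩
    · rintro ⟨j, h0, h1⟩
      have hjlt : j + 1 < ciag.toList.length := (List.getElem?_eq_some_iff.1 h1).1
      refine ⟨(j : Int) + 1, ?_, ?_⟩
      · rw [PySem.List.mem_pyRange_one]
        have hlen : PySem.Str.len ciag = ciag.toList.length := by simp
        rw [hlen]
        exact ⟨by omega, by omega⟩
      · simp only [Bool.and_eq_true, beq_iff_eq, PySem.Str.pyGet?_eq,
          PySem.Chars.pyGet?_eq_listPyGet?]
        have e0 : (j : Int) + 1 - 1 = ((j : Nat) : Int) := by ring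
        have e1 : (j : Int) + 1 = ((j + 1 : Nat) : Int) := by push_cast; ring
        rw [e0, e1, PySem.List.pyGet?_natCast, PySem.List.pyGet?_natCast]
        exact ⟨h1, h0⟩
  rw [key]
  cases h : adjOnes ciag.toList <;> simp

-- ===== VERDICT =====
theorem Czy_dwie_obok_spec : Claim_equal_Czy_dwie_obok := by
  intro ciag _
  unfold Spec_Czy_dwie_obok
  rw [a_eq_adjOnes, alt_eq_adjOnes]
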